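-- pv_equiv track=rewrite | github.com/lyty1997/DocRestore | backend/docrestore/pipeline/pipeline.py | _pick_cut_points
-- ===== SOURCE A (Python) =====
-- def _pick_cut_points(
--     marker_starts: list[int],
--     target_positions: list[int],
--     total: int,
-- ) -> list[int] | None:
--     """从 marker 候选里给每个目标位置挑最近的切点。
--
--     返回 None 表示找不到 N-1 个有效切点（含 marker_starts 耗尽或切点重叠）。
--     """
--     cut_points: list[int] = []
--     used: set[int] = set()
--     for target in target_positions:
--         best = -1
--         best_dist = total + 1
--         for idx, pos in enumerate(marker_starts):
--             if idx in used or pos == 0: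
--                 continue
--             d = abs(pos - target)
--             if d < best_dist:
--                 best_dist = d
--                 best = idx
--         if best < 0:
--             return None
--         used.add(best)
--         cut_points.append(marker_starts[best])
--     cut_points.sort()
--     # 去重/乱序校验：相邻切点必须严格递增
--     for i in range(1, len(cut_points)):
--         if cut_points[i] <= cut_points[i - 1]:
--             return None
--     return cut_points
-- ===== SOURCE B (Python) =====
-- from bisect import bisect_left
--
--
-- def _pick_cut_points(
--     marker_starts: list[int],
--     target_positions: list[int],
--     total: int,
-- ) -> list[int] | None:
--     # Sort usable markers once as (position, original index) pairs; for each
--     # target, binary-search the two nearest neighbours instead of scanning all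
--     # markers.  Tie-breaking (smallest original index among equidistant
--     # markers) matches the linear scan exactly.
--     pairs = sorted((pos, i) for i, pos in enumerate(marker_starts) if pos != 0)
--     poss = [p for p, _ in pairs]
--     cuts: list[int] = []
--     for t in target_positions:
--         if not pairs:
--             return None
--         k = bisect_left(poss, t)
--         best = None  # (distance, original index, index into pairs)
--         if k < len(pairs):
--             p, i = pairs[k]
--             best = (p - t, i, k)
--         if k > 0:
--             l_pos = poss[k - 1]
--             j = bisect_left(poss, l_pos)  # first (= smallest-index) marker at l_pos
--             p, i = pairs[j]
--             cand = (t - p, i, j)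
--             if best is None or cand < best:
--                 best = cand
--         dist, _, j = best
--         if dist > total:
--             return None
--         cuts.append(pairs[j][0])
--         pairs.pop(j)
--         poss.pop(j)
--     cuts.sort()
--     if any(b <= a for a, b in zip(cuts, cuts[1:])):
--         return None
--     return cuts
-- ===== Notes on version B (the rewrite author's own statement) =====
-- stated objective: faster
-- what changed: A rescans every marker for each target (nested linear argmin scan over a 'used' set); B sorts the usable (position, index) pairs once and, per target, binary-searches (bisect_left) the two neighbouring position groups in the shrinking sorted list, removing the chosen pair.
import Mathlib
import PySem

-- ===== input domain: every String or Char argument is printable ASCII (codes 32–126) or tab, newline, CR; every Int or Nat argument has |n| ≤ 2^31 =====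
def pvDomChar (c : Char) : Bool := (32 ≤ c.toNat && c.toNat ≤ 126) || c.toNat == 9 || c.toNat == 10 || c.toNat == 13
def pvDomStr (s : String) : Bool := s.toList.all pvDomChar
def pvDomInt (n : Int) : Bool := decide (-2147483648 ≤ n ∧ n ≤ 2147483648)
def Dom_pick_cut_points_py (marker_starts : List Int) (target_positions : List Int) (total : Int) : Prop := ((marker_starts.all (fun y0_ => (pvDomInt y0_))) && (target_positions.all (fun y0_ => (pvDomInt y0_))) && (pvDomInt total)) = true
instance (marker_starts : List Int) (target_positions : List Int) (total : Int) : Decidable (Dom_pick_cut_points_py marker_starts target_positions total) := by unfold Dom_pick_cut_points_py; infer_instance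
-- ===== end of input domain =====

-- B replaces A's per-target linear scan over all markers by a sort-once +
-- binary-search (bisect) nearest-neighbour lookup on the remaining markers.

-- ===== PORT A =====
-- inner 'for idx, pos in enumerate(marker_starts)' scan: nearest unused non-zero marker
def pvAbest (ms : List Int) (used : PySem.Set Int) (target total : Int) : Int × Int :=
  (PySem.List.enumerate ms 0).foldl
    (fun st ip =>
      if used.contains ip.1 || ip.2 == 0 then st
      else if |ip.2 - target| < st.2 then (ip.1, |ip.2 - target|) else st)
    (-1, total + 1)

-- outer 'for target in target_positions' loop (early 'return None' as Option)
def pvAloop (ms : List Int) (total : Int) : List Int → PySem.Set Int → List Int → Option (List Int)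
  | [], _, cuts => some cuts
  | t :: ts, used, cuts =>
    let bb := pvAbest ms used t total
    if bb.1 < 0 then none
    else pvAloop ms total ts (used.add bb.1)
        (cuts ++ [PySem.List.pyGetD ms bb.1 0])  -- marker_starts[best]: best is a valid index here

def pick_cut_points_py (marker_starts : List Int) (target_positions : List Int) (total : Int) : Option (List Int) :=
  match pvAloop marker_starts total target_positions PySem.Set.empty [] with
  | none => none
  | some cuts =>
    let cp := PySem.List.sorted cuts (fun x => x) false
    -- 'for i in range(1, len(cut_points))' check; the early 'return None' is the fold ending false
    let ok := (PySem.List.pyRange 1 (cp.length : Int) 1).foldl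
        (fun ok i => if PySem.List.pyGetD cp i 0 ≤ PySem.List.pyGetD cp (i - 1) 0 then false else ok) true
    if ok then some cp else none

-- ===== PORT B =====
-- Python '<' on the (distance, original index, list position) triples
def pvLt3 (a b : Int × Int × Nat) : Bool :=
  decide (a.1 < b.1) ||
    (a.1 == b.1 && (decide (a.2.1 < b.2.1) || (a.2.1 == b.2.1 && decide (a.2.2 < b.2.2))))

-- helper _nearest(pairs, poss, t) of Source B: bisect the two neighbour groups
def pvBbest (pairs : List (Int × Int)) (poss : List Int) (t : Int) : Option (Int × Int × Nat) :=
  let k := PySem.List.bisectLeft poss t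
  let best1 : Option (Int × Int × Nat) :=
    if k < pairs.length then
      some ((pairs.getD k (0, 0)).1 - t, (pairs.getD k (0, 0)).2, k)  -- pairs[k]: in range
    else none
  if 0 < k then
    let j := PySem.List.bisectLeft poss (poss.getD (k - 1) 0)  -- poss[k-1]: in range
    let cand : Int × Int × Nat := (t - (pairs.getD j (0, 0)).1, (pairs.getD j (0, 0)).2, j)
    match best1 with
    | none => some cand
    | some b => some (if pvLt3 cand b then cand else b)
  else best1

def pvBloop (total : Int) : List Int → List (Int × Int) → List Int → List Int → Option (List Int)
  | [], _, _, cuts => some cuts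
  | t :: ts, pairs, poss, cuts =>
    if pairs.isEmpty then none
    else
      match pvBbest pairs poss t with
      | none => none  -- unreachable: pairs nonempty gives a candidate
      | some (dist, _, j) =>
        if total < dist then none
        else pvBloop total ts (pairs.eraseIdx j) (poss.eraseIdx j)
            (cuts ++ [(pairs.getD j (0, 0)).1])  -- pairs[j][0], then pop j from both lists

def pick_cut_points_py_alt (marker_starts : List Int) (target_positions : List Int) (total : Int) : Option (List Int) :=
  let pairs := PySem.List.sorted2
      ((PySem.List.enumerate marker_starts 0).filterMap
        (fun ip => if ip.2 ≠ 0 then some (ip.2, ip.1) else none))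
      Prod.fst Prod.snd
  match pvBloop total target_positions pairs (pairs.map Prod.fst) [] with
  | none => none
  | some cuts =>
    let cp := PySem.List.sorted cuts (fun x => x) false
    if (cp.zip cp.tail).any (fun ab => decide (ab.2 ≤ ab.1)) then none else some cp

-- ===== PRECONDITION & SPEC =====
def Spec_pick_cut_points_py (marker_starts : List Int) (target_positions : List Int) (total : Int) (out : Option (List Int)) : Prop := out = pick_cut_points_py_alt marker_starts target_positions total
instance (marker_starts : List Int) (target_positions : List Int) (total : Int) (out : Option (List Int)) : Decidable (Spec_pick_cut_points_py marker_starts target_positions total out) := by unfold Spec_pick_cut_points_py; infer_instance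

-- ===== CLAIM (what is proved, stated in full; the proofs are below) =====
def Claim_equal_pick_cut_points_py : Prop := ∀ (marker_starts : List Int) (target_positions : List Int) (total : Int), Dom_pick_cut_points_py marker_starts target_positions total → Spec_pick_cut_points_py marker_starts target_positions total (pick_cut_points_py marker_starts target_positions total)

-- ===== LEMMAS AND PROOFS =====

-- lexicographic order on (distance, index) pairs
def pvLexLt (a b : Int × Int) : Prop := a.1 < b.1 ∨ (a.1 = b.1 ∧ a.2 < b.2)
def pvLexLe (a b : Int × Int) : Prop := a.1 < b.1 ∨ (a.1 = b.1 ∧ a.2 ≤ b.2)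

-- the candidate pairs (position, index) still available for selection
def pvCand (ms : List Int) (used : PySem.Set Int) (pi : Int × Int) : Prop :=
  ∃ k : Nat, ∃ _ : k < ms.length,
    pi.2 = (k : Int) ∧ pi.1 = ms[k] ∧ ms[k] ≠ 0 ∧ used.contains (k : Int) = false

lemma pvLexLe_trans {a b c : Int × Int} (h1 : pvLexLe a b) (h2 : pvLexLe b c) : pvLexLe a c := by
  unfold pvLexLe at *; omega

lemma pvLexLe_antisymm {a b : Int × Int} (h1 : pvLexLe a b) (h2 : pvLexLe b a) : a = b := by
  obtain ⟨a1, a2⟩ := a; obtain ⟨b1, b2⟩ := b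
  unfold pvLexLe at *; simp only [Prod.mk.injEq]; omega

lemma pvLexLt_of_not_ge {a b : Int × Int} (hne : a ≠ b) (h : ¬ pvLexLt b a) : pvLexLt a b := by
  obtain ⟨a1, a2⟩ := a; obtain ⟨b1, b2⟩ := b
  simp only [ne_eq, Prod.mk.injEq, not_and_or] at hne
  unfold pvLexLt at *; omega

-- ---------- A side: the fold computes the lexicographic argmin ----------

lemma pvfold_spec (t : Int) (l : List (Int × Int)) : ∀ (st : Int × Int),
    List.Pairwise (fun a b : Int × Int => a.1 < b.1) l →
    (∀ x ∈ l, st.1 < x.1) →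
    ((List.foldl (fun st ip => if |ip.2 - t| < st.2 then (ip.1, |ip.2 - t|) else st) st l = st ∨
        ∃ ip ∈ l, List.foldl (fun st ip => if |ip.2 - t| < st.2 then (ip.1, |ip.2 - t|) else st) st l = (ip.1, |ip.2 - t|)) ∧
      (∀ ip ∈ l, pvLexLe ((List.foldl (fun st ip => if |ip.2 - t| < st.2 then (ip.1, |ip.2 - t|) else st) st l).2,
          (List.foldl (fun st ip => if |ip.2 - t| < st.2 then (ip.1, |ip.2 - t|) else st) st l).1) (|ip.2 - t|, ip.1)) ∧
      (List.foldl (fun st ip => if |ip.2 - t| < st.2 then (ip.1, |ip.2 - t|) else st) st l ≠ st →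
        (List.foldl (fun st ip => if |ip.2 - t| < st.2 then (ip.1, |ip.2 - t|) else st) st l).2 < st.2)) := by
  induction l with
  | nil => intro st _ _; exact ⟨Or.inl rfl, fun ip hip => absurd hip (List.not_mem_nil), fun h => absurd rfl h⟩
  | cons hd tl ih =>
    intro st hpw hlt
    have hpwtl := hpw.of_cons
    have hhd : ∀ x ∈ tl, hd.1 < x.1 := (List.pairwise_cons.mp hpw).1
    simp only [List.foldl_cons]
    by_cases hupd : |hd.2 - t| < st.2
    · rw [if_pos hupd]
      obtain ⟨hi, hii, hiii⟩ := ih (hd.1, |hd.2 - t|) hpwtl hhd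
      set r := List.foldl (fun st ip => if |ip.2 - t| < st.2 then (ip.1, |ip.2 - t|) else st) (hd.1, |hd.2 - t|) tl with hr
      refine ⟨?_, ?_, ?_⟩
      · rcases hi with h | ⟨ip, hmem, h⟩
        · exact Or.inr ⟨hd, List.mem_cons_self .., h⟩
        · exact Or.inr ⟨ip, List.mem_cons_of_mem _ hmem, h⟩
      · intro ip hmem
        rcases List.mem_cons.mp hmem with h | h
        · subst h
          by_cases hrst : r = (ip.1, |ip.2 - t|)
          · rw [hrst]; exact Or.inr ⟨rfl, le_refl _⟩
          · exact Or.inl (by simpa using hiii hrst)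
        · exact hii ip h
      · intro hne
        by_cases hrst : r = (hd.1, |hd.2 - t|)
        · rw [hrst]; exact hupd
        · exact lt_trans (hiii hrst) hupd
    · rw [if_neg hupd]
      obtain ⟨hi, hii, hiii⟩ := ih st hpwtl (fun x hx => hlt x (List.mem_cons_of_mem _ hx))
      set r := List.foldl (fun st ip => if |ip.2 - t| < st.2 then (ip.1, |ip.2 - t|) else st) st tl with hr
      refine ⟨?_, ?_, hiii⟩
      · rcases hi with h | ⟨ip, hmem, h⟩
        · exact Or.inl h
        · exact Or.inr ⟨ip, List.mem_cons_of_mem _ hmem, h⟩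
      · intro ip hmem
        rcases List.mem_cons.mp hmem with h | h
        · subst h
          by_cases hrst : r = st
          · rw [hrst]
            rcases lt_or_eq_of_le (not_lt.mp hupd) with h' | h'
            · exact Or.inl h'
            · exact Or.inr ⟨h', le_of_lt (hlt ip (List.mem_cons_self ..))⟩
          · exact Or.inl (lt_of_lt_of_le (hiii hrst) (not_lt.mp hupd))
        · exact hii ip h

-- the candidates in A's scan order
def pvCl (ms : List Int) (used : PySem.Set Int) : List (Int × Int) :=
  (PySem.List.enumerate ms 0).filter (fun ip => !(used.contains ip.1 || ip.2 == 0))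

lemma pvAbest_eq_filter (ms : List Int) (used : PySem.Set Int) (t total : Int) :
    pvAbest ms used t total =
      (pvCl ms used).foldl (fun st ip => if |ip.2 - t| < st.2 then (ip.1, |ip.2 - t|) else st) (-1, total + 1) := by
  unfold pvAbest pvCl
  rw [PySem.List.foldl_congr_mem _ _
      (fun st ip => if (!(used.contains ip.1 || ip.2 == 0)) = true
        then (if |ip.2 - t| < st.2 then (ip.1, |ip.2 - t|) else st) else st) _
      (by intro acc x _; cases h : (used.contains x.1 || x.2 == 0) <;> simp only [h, Bool.not_false, Bool.not_true] <;> simp)]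
  exact PySem.List.foldl_if_eq_foldl_filter _ _ _ _

lemma pv_mem_cl_iff (ms : List Int) (used : PySem.Set Int) (ip : Int × Int) :
    ip ∈ pvCl ms used ↔ pvCand ms used (ip.2, ip.1) := by
  unfold pvCl pvCand
  rw [List.mem_filter]
  simp only [Bool.not_eq_eq_eq_not, Bool.not_true, Bool.or_eq_false_iff, beq_eq_false_iff_ne,
    PySem.List.mem_enumerate_iff]
  constructor
  · rintro ⟨⟨k, hk, rfl⟩, hc, hnz⟩
    exact ⟨k, hk, by simp, by simp, by simpa using hnz, by simpa using hc⟩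
  · rintro ⟨k, hk, h2, h1, hnz, hc⟩
    refine ⟨⟨k, hk, ?_⟩, by simpa [h2] using hc, by simpa [h1] using hnz⟩
    obtain ⟨i, p⟩ := ip
    simp only at h1 h2
    simp [h1, h2]

lemma pv_pairwise_fst_cl (ms : List Int) (used : PySem.Set Int) :
    (pvCl ms used).Pairwise (fun a b : Int × Int => a.1 < b.1) :=
  (PySem.List.pairwise_lt_enumerate ms 0).filter _

lemma pv_neg_one_lt_cl (ms : List Int) (used : PySem.Set Int) :
    ∀ x ∈ pvCl ms used, (-1 : Int) < x.1 := by
  intro x hx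
  have := (List.mem_filter.mp hx).1
  obtain ⟨k, hk, rfl⟩ := (PySem.List.mem_enumerate_iff _ _ _).mp this
  simp only [zero_add]
  omega

-- ---------- B side: the bisect selection is the lexicographic argmin ----------

lemma pvLt3_le {a b : Int × Int × Nat} (h : pvLt3 a b = true) : pvLexLe (a.1, a.2.1) (b.1, b.2.1) := by
  unfold pvLt3 at h
  unfold pvLexLe
  simp only [Bool.or_eq_true, Bool.and_eq_true, decide_eq_true_eq, beq_iff_eq] at h
  omega

lemma pvLt3_not_le {a b : Int × Int × Nat} (h : pvLt3 a b = false) : pvLexLe (b.1, b.2.1) (a.1, a.2.1) := by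
  unfold pvLt3 at h
  unfold pvLexLe
  simp only [Bool.or_eq_false_iff, Bool.and_eq_false_iff, decide_eq_false_iff_not, beq_eq_false_iff_ne] at h
  by_cases hab : a.1 = b.1 <;> omega

lemma pvBbest_spec (rem : List (Int × Int)) (t : Int) (hne : rem ≠ [])
    (hpw : rem.Pairwise pvLexLt) :
    ∃ (j : Nat) (hj : j < rem.length),
      pvBbest rem (rem.map Prod.fst) t = some (|rem[j].1 - t|, rem[j].2, j) ∧
      ∀ x ∈ rem, pvLexLe (|rem[j].1 - t|, rem[j].2) (|x.1 - t|, x.2) := by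
  have hlex : ∀ i j (hi : i < rem.length) (hj : j < rem.length), i < j → pvLexLt rem[i] rem[j] :=
    fun i j hi hj hij => List.pairwise_iff_getElem.mp hpw i j hi hj hij
  have hfstmono : ∀ i j (hi : i < rem.length) (hj : j < rem.length), i ≤ j → rem[i].1 ≤ rem[j].1 := by
    intro i j hi hj hij
    rcases Nat.lt_or_ge i j with h | h
    · rcases hlex i j hi hj h with h' | ⟨h', _⟩ <;> omega
    · have : i = j := by omega
      subst this; exact le_refl _
  set poss := rem.map Prod.fst with hposs
  have hplen : poss.length = rem.length := List.length_map ..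
  have hpget : ∀ m (hm : m < rem.length), poss[m]'(by omega) = rem[m].1 := by
    intro m hm; simp [hposs]
  have hpossm : poss.Pairwise (· ≤ ·) := by
    rw [hposs, List.pairwise_map]
    exact hpw.imp (by intro a b h; rcases h with h | ⟨h, _⟩ <;> omega)
  obtain ⟨hkle, hklt, hkge⟩ := PySem.List.bisectLeft_spec poss t hpossm
  set k := PySem.List.bisectLeft poss t with hk
  have hn0 : 0 < rem.length := List.length_pos_iff.mpr hne
  simp only [pvBbest]
  rw [← hk]
  by_cases hklen : k < rem.length
  · -- right candidate exists
    have hb1 : (if k < rem.length then some ((rem.getD k (0, 0)).1 - t, (rem.getD k (0, 0)).2, k)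
        else none) = some (rem[k].1 - t, rem[k].2, k) := by
      rw [if_pos hklen, List.getD_eq_getElem _ _ hklen]
    have htR : t ≤ rem[k].1 := by
      have := hkge k (by omega) (le_refl _)
      rwa [hpget k hklen] at this
    have habsR : |rem[k].1 - t| = rem[k].1 - t := abs_of_nonneg (by omega)
    have hright : ∀ m (hm : m < rem.length), k ≤ m →
        pvLexLe (|rem[k].1 - t|, rem[k].2) (|rem[m].1 - t|, rem[m].2) := by
      intro m hm hkm
      have htm : t ≤ rem[m].1 := by have := hkge m (by omega) hkm; rwa [hpget m hm] at this
      have habsm : |rem[m].1 - t| = rem[m].1 - t := abs_of_nonneg (by omega)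
      have hRm : rem[k].1 ≤ rem[m].1 := hfstmono k m hklen hm hkm
      rw [habsR, habsm]
      rcases Nat.lt_or_ge k m with hlt' | hge'
      · rcases hlex k m hklen hm hlt' with h | ⟨h, h2⟩
        · exact Or.inl (by omega)
        · exact Or.inr ⟨by omega, by omega⟩
      · have : k = m := by omega
        subst this; exact Or.inr ⟨rfl, le_refl _⟩
    by_cases hk0 : 0 < k
    · -- both neighbours exist
      have hk1 : k - 1 < rem.length := by omega
      have hLget : poss.getD (k - 1) 0 = rem[k - 1].1 := by
        rw [List.getD_eq_getElem _ _ (by omega)]; exact hpget (k - 1) hk1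
      rw [hLget]
      set L := rem[k - 1].1 with hL
      have hLlt : L < t := by
        have := hklt (k - 1) (by omega) (by omega)
        rwa [hpget (k - 1) hk1] at this
      obtain ⟨hjle, hjlt, hjge⟩ := PySem.List.bisectLeft_spec poss L hpossm
      set j := PySem.List.bisectLeft poss L with hj
      have hjk : j ≤ k - 1 := by
        by_contra h
        have := hjlt (k - 1) (by omega) (by omega)
        rw [hpget (k - 1) hk1] at this
        omega
      have hjlen : j < rem.length := by omega
      have hjL : rem[j].1 = L := by
        have h1 : L ≤ poss[j]'(by omega) := hjge j (by omega) (le_refl _)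
        rw [hpget j hjlen] at h1
        have h2 : rem[j].1 ≤ L := hL ▸ hfstmono j (k - 1) hjlen hk1 hjk
        omega
      have habsL : |rem[j].1 - t| = t - rem[j].1 := by rw [abs_of_neg (by omega)]; ring
      have hleft : ∀ m (hm : m < rem.length), m < k →
          pvLexLe (|rem[j].1 - t|, rem[j].2) (|rem[m].1 - t|, rem[m].2) := by
        intro m hm hmk
        have htm : rem[m].1 < t := by have := hklt m (by omega) hmk; rwa [hpget m hm] at this
        have habsm : |rem[m].1 - t| = t - rem[m].1 := by rw [abs_of_neg (by omega)]; ring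
        have hmL : rem[m].1 ≤ L := hL ▸ hfstmono m (k - 1) hm hk1 (by omega)
        rw [habsL, habsm]
        rcases lt_or_eq_of_le hmL with hlt' | heq'
        · exact Or.inl (by omega)
        · -- rem[m].1 = L, so m is in the L-group which starts at j
          have hjm : j ≤ m := by
            by_contra h
            have := hjlt m (by omega) (by omega)
            rw [hpget m hm] at this
            omega
          rcases Nat.lt_or_ge j m with hlt'' | hge''
          · rcases hlex j m hjlen hm hlt'' with h | ⟨h, h2⟩
            · rw [hjL] at h; omega
            · exact Or.inr ⟨by omega, by omega⟩
          · have : j = m := by omega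
            subst this; exact Or.inr ⟨by omega, le_refl _⟩
      rw [if_pos hk0, hb1]
      rw [List.getD_eq_getElem _ _ hjlen]
      set cand : Int × Int × Nat := (t - rem[j].1, rem[j].2, j) with hcand
      set b : Int × Int × Nat := (rem[k].1 - t, rem[k].2, k) with hb
      have hred : (match some b with
          | none => some cand
          | some b' => some (if pvLt3 cand b' = true then cand else b')) =
            some (if pvLt3 cand b = true then cand else b) := rfl
      rw [hred]
      by_cases hlt3 : pvLt3 cand b = true
      · rw [if_pos hlt3]
        refine ⟨j, hjlen, by rw [habsL], ?_⟩
        intro x hx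
        obtain ⟨m, hm, rfl⟩ := List.mem_iff_getElem.mp hx
        rcases Nat.lt_or_ge m k with h | h
        · exact hleft m hm h
        · have h1 : pvLexLe (cand.1, cand.2.1) (b.1, b.2.1) := pvLt3_le hlt3
          have h2 : pvLexLe (|rem[j].1 - t|, rem[j].2) (|rem[k].1 - t|, rem[k].2) := by
            rw [habsL, habsR]; exact h1
          exact pvLexLe_trans h2 (hright m hm h)
      · rw [if_neg (by simpa using hlt3)]
        refine ⟨k, hklen, by rw [habsR], ?_⟩
        intro x hx
        obtain ⟨m, hm, rfl⟩ := List.mem_iff_getElem.mp hx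
        rcases Nat.lt_or_ge m k with h | h
        · have h1 : pvLexLe (b.1, b.2.1) (cand.1, cand.2.1) :=
            pvLt3_not_le (by simpa using hlt3)
          have h2 : pvLexLe (|rem[k].1 - t|, rem[k].2) (|rem[j].1 - t|, rem[j].2) := by
            rw [habsL, habsR]; exact h1
          exact pvLexLe_trans h2 (hleft m hm h)
        · exact hright m hm h
    · -- k = 0: only the right candidate
      rw [if_neg hk0, hb1]
      refine ⟨k, hklen, by rw [habsR], ?_⟩
      intro x hx
      obtain ⟨m, hm, rfl⟩ := List.mem_iff_getElem.mp hx
      exact hright m hm (by omega)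
  · -- k = rem.length: only the left candidate
    have hkeq : k = rem.length := by omega
    have hk0 : 0 < k := by omega
    have hk1 : k - 1 < rem.length := by omega
    have hLget : poss.getD (k - 1) 0 = rem[k - 1].1 := by
      rw [List.getD_eq_getElem _ _ (by omega)]; exact hpget (k - 1) hk1
    have hb1 : (if k < rem.length then some ((rem.getD k (0, 0)).1 - t, (rem.getD k (0, 0)).2, k)
        else none) = (none : Option (Int × Int × Nat)) := if_neg hklen
    rw [hb1, if_pos hk0, hLget]
    set L := rem[k - 1].1 with hL
    have hLlt : L < t := by
      have := hklt (k - 1) (by omega) (by omega)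
      rwa [hpget (k - 1) hk1] at this
    obtain ⟨hjle, hjlt, hjge⟩ := PySem.List.bisectLeft_spec poss L hpossm
    set j := PySem.List.bisectLeft poss L with hj
    have hjk : j ≤ k - 1 := by
      by_contra h
      have := hjlt (k - 1) (by omega) (by omega)
      rw [hpget (k - 1) hk1] at this
      omega
    have hjlen : j < rem.length := by omega
    have hjL : rem[j].1 = L := by
      have h1 : L ≤ poss[j]'(by omega) := hjge j (by omega) (le_refl _)
      rw [hpget j hjlen] at h1
      have h2 : rem[j].1 ≤ L := hL ▸ hfstmono j (k - 1) hjlen hk1 hjk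
      omega
    have habsL : |rem[j].1 - t| = t - rem[j].1 := by rw [abs_of_neg (by omega)]; ring
    rw [List.getD_eq_getElem _ _ hjlen]
    refine ⟨j, hjlen, by rw [habsL], ?_⟩
    intro x hx
    obtain ⟨m, hm, rfl⟩ := List.mem_iff_getElem.mp hx
    have htm : rem[m].1 < t := by
      have := hklt m (by omega) (by omega)
      rwa [hpget m hm] at this
    have habsm : |rem[m].1 - t| = t - rem[m].1 := by rw [abs_of_neg (by omega)]; ring
    have hmL : rem[m].1 ≤ L := hL ▸ hfstmono m (k - 1) hm hk1 (by omega)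
    rw [habsL, habsm]
    rcases lt_or_eq_of_le hmL with hlt' | heq'
    · exact Or.inl (by omega)
    · have hjm : j ≤ m := by
        by_contra h
        have := hjlt m (by omega) (by omega)
        rw [hpget m hm] at this
        omega
      rcases Nat.lt_or_ge j m with hlt'' | hge''
      · rcases hlex j m hjlen hm hlt'' with h | ⟨h, h2⟩
        · rw [hjL] at h; omega
        · exact Or.inr ⟨by omega, by omega⟩
      · have : j = m := by omega
        subst this; exact Or.inr ⟨by omega, le_refl _⟩

-- ---------- invariant plumbing ----------

lemma pv_mem_eraseIdx : ∀ (l : List (Int × Int)) (j : Nat) (_ : l.Nodup) (hj : j < l.length)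
    (x : Int × Int), x ∈ l.eraseIdx j ↔ x ∈ l ∧ x ≠ l[j]
  | [], j, _, hj, _ => by simp at hj
  | hd :: tl, 0, hnd, hj, x => by
      simp only [List.eraseIdx_cons_zero, List.getElem_cons_zero, List.mem_cons]
      constructor
      · intro hx
        refine ⟨Or.inr hx, ?_⟩
        rintro rfl
        exact (List.nodup_cons.mp hnd).1 hx
      · rintro ⟨h | h, hne⟩
        · exact absurd h hne
        · exact h
  | hd :: tl, j + 1, hnd, hj, x => by
      simp only [List.eraseIdx_cons_succ, List.mem_cons, List.getElem_cons_succ]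
      have ihx := pv_mem_eraseIdx tl j (List.nodup_cons.mp hnd).2 (by simpa using hj) x
      constructor
      · intro hx
        rcases hx with hx | hx
        · refine ⟨Or.inl hx, fun hx2 => (List.nodup_cons.mp hnd).1 ?_⟩
          have hd2 : hd = tl[j]'(by simpa using hj) := by rw [← hx, hx2]
          rw [hd2]
          exact List.getElem_mem _
        · obtain ⟨hmem, hne⟩ := ihx.mp hx
          exact ⟨Or.inr hmem, hne⟩
      · rintro ⟨hx | hx, hne⟩
        · exact Or.inl hx
        · exact Or.inr (ihx.mpr ⟨hx, hne⟩)

lemma pv_nodup_of_pairwise {l : List (Int × Int)} (h : l.Pairwise pvLexLt) : l.Nodup :=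
  h.imp (by
    intro a b hab
    rintro rfl
    unfold pvLexLt at hab
    omega)

lemma pv_contains_false {s : PySem.Set Int} {x : Int} : s.contains x = false ↔ x ∉ s := by
  rw [← Bool.not_eq_true, PySem.Set.contains_iff]

-- ---------- the main loop equivalence ----------

lemma pvloop_eq (ms : List Int) (total : Int) :
    ∀ (ts : List Int) (used : PySem.Set Int) (rem : List (Int × Int)) (cuts : List Int),
      rem.Pairwise pvLexLt →
      (∀ pi : Int × Int, pi ∈ rem ↔ pvCand ms used pi) →
      pvAloop ms total ts used cuts = pvBloop total ts rem (rem.map Prod.fst) cuts := by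
  intro ts
  induction ts with
  | nil => intro used rem cuts _ _; rfl
  | cons t ts ih =>
    intro used rem cuts hpw hmem
    by_cases hrem : rem = []
    · subst hrem
      have hcl : pvCl ms used = [] := by
        unfold pvCl
        rw [List.filter_eq_nil_iff]
        intro ip hip
        by_contra h
        have : ip ∈ pvCl ms used := List.mem_filter.mpr ⟨hip, by simpa using h⟩
        have := (pv_mem_cl_iff ms used ip).mp this
        exact absurd ((hmem _).mpr this) (List.not_mem_nil)
      have hbb : pvAbest ms used t total = (-1, total + 1) := by
        rw [pvAbest_eq_filter, hcl]; rfl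
      simp only [pvAloop, pvBloop, hbb]
      norm_num
    · obtain ⟨j, hj, hbesteq, hbound⟩ := pvBbest_spec rem t hrem hpw
      have hremj : rem[j] ∈ rem := List.getElem_mem _
      obtain ⟨kk, hkk, hji, hjp, hnz, hnc⟩ := (hmem _).mp hremj
      have hcl_iff : ∀ ip : Int × Int, ip ∈ pvCl ms used ↔ (ip.2, ip.1) ∈ rem := by
        intro ip; rw [pv_mem_cl_iff, hmem]
      obtain ⟨hAi, hAii, hAiii⟩ := pvfold_spec t (pvCl ms used) (-1, total + 1)
        (pv_pairwise_fst_cl ms used) (pv_neg_one_lt_cl ms used)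
      rw [← pvAbest_eq_filter] at hAi hAii hAiii
      set bb := pvAbest ms used t total with hbb
      set dstar := |rem[j].1 - t| with hdstar
      simp only [pvAloop, pvBloop, List.isEmpty_eq_false_iff.mpr hrem, Bool.false_eq_true, if_false, hbesteq]
      rw [← hbb]
      by_cases htot : total < dstar
      · -- no candidate within the threshold: both return none
        have hbbinit : bb = (-1, total + 1) := by
          by_contra hne
          rcases hAi with h | ⟨ip, hip, h⟩
          · exact hne h
          · have h1 : (ip.2, ip.1) ∈ rem := (hcl_iff ip).mp hip
            have h2 := hbound _ h1
            have h3 := hAiii hne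
            rw [h] at h3
            simp [pvLexLe] at h2 h3
            omega
        rw [hbbinit, if_pos (by norm_num), if_pos htot]
      · -- the argmin is selected on both sides
        have hipstar : ((rem[j].2 : Int), rem[j].1) ∈ pvCl ms used := (hcl_iff _).mpr (by simp [hremj])
        have hub := hAii _ hipstar
        simp only at hub
        have hbbne : bb ≠ (-1, total + 1) := by
          intro h
          rw [h] at hub
          unfold pvLexLe at hub
          simp only at hub
          omega
        have hbbeq : bb = (rem[j].2, dstar) := by
          rcases hAi with h | ⟨ip, hip, h⟩
          · exact absurd h hbbne
          · have h1 : (ip.2, ip.1) ∈ rem := (hcl_iff ip).mp hip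
            have h2 := hbound _ h1
            simp only at h2
            rw [h] at hub ⊢
            simp only at hub
            have := pvLexLe_antisymm hub h2
            rw [Prod.ext_iff] at this
            simp only at this
            rw [Prod.ext_iff]
            exact ⟨this.2, this.1⟩
        rw [hbbeq]
        have hge0 : ¬ ((rem[j].2, dstar).1 < 0) := by simp only [hji]; omega
        rw [if_neg hge0, if_neg htot]
        have happend : PySem.List.pyGetD ms (rem[j].2, dstar).1 0 = (rem.getD j (0, 0)).1 := by
          simp only [hji]
          rw [PySem.List.pyGetD_eq_getElem ms 0 (by omega) (by exact_mod_cast hkk)]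
          rw [List.getD_eq_getElem _ _ hj]
          simp [hjp]
        rw [happend]
        rw [List.eraseIdx_map]
        apply ih
        · exact List.Pairwise.sublist (List.eraseIdx_sublist rem j) hpw
        · intro pi
          rw [pv_mem_eraseIdx rem j (pv_nodup_of_pairwise hpw) hj]
          unfold pvCand
          constructor
          · rintro ⟨hin, hne⟩
            obtain ⟨m, hm, h2, h1, hnz', hnc'⟩ := (hmem pi).mp hin
            refine ⟨m, hm, h2, h1, hnz', ?_⟩
            rw [pv_contains_false, PySem.Set.mem_add]
            push Not
            refine ⟨pv_contains_false.mp hnc', ?_⟩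
            simp only [hji]
            intro heq
            apply hne
            have hmk : m = kk := by exact_mod_cast heq
            subst hmk
            rw [Prod.ext_iff]
            exact ⟨by rw [h1, hjp], by rw [h2, hji]⟩
          · rintro ⟨m, hm, h2, h1, hnz', hnc'⟩
            rw [pv_contains_false, PySem.Set.mem_add] at hnc'
            push Not at hnc'
            refine ⟨(hmem pi).mpr ⟨m, hm, h2, h1, hnz', pv_contains_false.mpr hnc'.1⟩, ?_⟩
            intro heq
            apply hnc'.2
            rw [heq] at h2
            simp only [hji] at ⊢ h2
            exact h2 ▸ (by rw [h2])

-- ---------- initial state ----------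

def pvBefore (a b : Int × Int) : Bool :=
  decide (a.1 < b.1) || (!decide (b.1 < a.1) && decide (a.2 < b.2))

lemma pv_insertBy_pairwise (x : Int × Int) (ys : List (Int × Int))
    (h : ys.Pairwise (fun a b => ¬ pvLexLt b a)) :
    (PySem.List.insertBy pvBefore x ys).Pairwise (fun a b => ¬ pvLexLt b a) := by
  induction ys with
  | nil => simp [PySem.List.insertBy]
  | cons y ys ih =>
    obtain ⟨hy, hys⟩ := List.pairwise_cons.mp h
    unfold PySem.List.insertBy
    by_cases hb : pvBefore x y = true
    · rw [if_pos hb]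
      have hxy : pvLexLt x y := by
        unfold pvBefore at hb
        simp only [Bool.or_eq_true, Bool.and_eq_true, Bool.not_eq_true',
          decide_eq_true_eq, decide_eq_false_iff_not] at hb
        unfold pvLexLt
        omega
      refine List.pairwise_cons.mpr ⟨?_, h⟩
      intro z hz
      rcases List.mem_cons.mp hz with rfl | hz'
      · unfold pvLexLt at *; omega
      · have hyz := hy z hz'
        unfold pvLexLt at *; omega
    · rw [if_neg hb]
      refine List.pairwise_cons.mpr ⟨?_, ih hys⟩
      intro z hz
      rcases (PySem.List.mem_insertBy _ _ _ _).mp hz with rfl | hz'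
      · unfold pvBefore at hb
        simp only [Bool.or_eq_true, Bool.and_eq_true, Bool.not_eq_true',
          decide_eq_true_eq, decide_eq_false_iff_not, not_or, not_and] at hb
        unfold pvLexLt
        omega
      · exact hy z hz'

lemma pv_foldl_insertBy_pairwise (xs : List (Int × Int)) :
    ∀ acc : List (Int × Int), acc.Pairwise (fun a b => ¬ pvLexLt b a) →
      (xs.foldl (fun acc x => PySem.List.insertBy pvBefore x acc) acc).Pairwise
        (fun a b => ¬ pvLexLt b a) := by
  induction xs with
  | nil => intro acc h; exact h
  | cons x xs ih => intro acc h; exact ih _ (pv_insertBy_pairwise x acc h)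

def pvFl (ms : List Int) : List (Int × Int) :=
  (PySem.List.enumerate ms 0).filterMap (fun ip => if ip.2 ≠ 0 then some (ip.2, ip.1) else none)

lemma pv_sorted2_eq (ms : List Int) :
    PySem.List.sorted2 (pvFl ms) Prod.fst Prod.snd =
      (pvFl ms).foldl (fun acc x => PySem.List.insertBy pvBefore x acc) [] := rfl

lemma pv_fl_pairwise_snd (ms : List Int) :
    (pvFl ms).Pairwise (fun a b : Int × Int => a.2 < b.2) := by
  unfold pvFl
  rw [List.pairwise_filterMap]
  refine (PySem.List.pairwise_lt_enumerate ms 0).imp ?_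
  intro a b hab x hx y hy
  split at hx
  · split at hy
    · simp only [Option.some.injEq] at hx hy
      subst hx; subst hy
      simpa using hab
    · exact absurd hy (by simp)
  · exact absurd hx (by simp)

lemma pv_rem0_nodup (ms : List Int) :
    (PySem.List.sorted2 (pvFl ms) Prod.fst Prod.snd).Nodup :=
  ((PySem.List.sorted2_perm (pvFl ms) Prod.fst Prod.snd false).symm.nodup
    ((pv_fl_pairwise_snd ms).imp (by intro a b h; rintro rfl; omega)))

lemma pv_rem0_pairwise (ms : List Int) :
    (PySem.List.sorted2 (pvFl ms) Prod.fst Prod.snd).Pairwise pvLexLt := by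
  have h1 : (PySem.List.sorted2 (pvFl ms) Prod.fst Prod.snd).Pairwise (fun a b => ¬ pvLexLt b a) := by
    rw [pv_sorted2_eq]
    exact pv_foldl_insertBy_pairwise _ [] (by simp)
  have h2 := pv_rem0_nodup ms
  exact (h1.and h2).imp (by
    intro a b ⟨hle, hne⟩
    exact pvLexLt_of_not_ge hne hle)

lemma pv_rem0_mem (ms : List Int) (pi : Int × Int) :
    pi ∈ PySem.List.sorted2 (pvFl ms) Prod.fst Prod.snd ↔ pvCand ms PySem.Set.empty pi := by
  rw [(PySem.List.sorted2_perm (pvFl ms) Prod.fst Prod.snd false).mem_iff]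
  unfold pvFl pvCand
  rw [List.mem_filterMap]
  simp only [PySem.List.mem_enumerate_iff]
  constructor
  · rintro ⟨ip, ⟨k, hk, rfl⟩, hsome⟩
    split at hsome
    · rename_i hnz
      simp only [Option.some.injEq] at hsome
      subst hsome
      refine ⟨k, hk, by simp, by simp, by simpa using hnz, rfl⟩
    · exact absurd hsome (by simp)
  · rintro ⟨k, hk, h2, h1, hnz, _⟩
    refine ⟨(0 + (k : Int), ms[k]), ⟨k, hk, rfl⟩, ?_⟩
    rw [if_pos (by simpa using hnz)]
    obtain ⟨p, i⟩ := pi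
    simp only at h1 h2
    simp [h1, h2]

-- ---------- final strict-increase check ----------

lemma pv_check_eq (cp : List Int) :
    ((PySem.List.pyRange 1 (cp.length : Int) 1).foldl
        (fun ok i => if PySem.List.pyGetD cp i 0 ≤ PySem.List.pyGetD cp (i - 1) 0 then false else ok) true)
      = !((cp.zip cp.tail).any (fun ab => decide (ab.2 ≤ ab.1))) := by
  rw [PySem.List.foldl_congr_mem _ _
      (fun ok i => if (decide (PySem.List.pyGetD cp i 0 ≤ PySem.List.pyGetD cp (i - 1) 0)) = true
        then false else ok) _ (by intro acc x _; simp)]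
  rw [PySem.List.foldl_if_false_eq]
  rw [Bool.true_and]
  congr 1
  rw [Bool.eq_iff_iff]
  simp only [List.any_eq_true, decide_eq_true_eq, PySem.List.mem_pyRange_one]
  constructor
  · rintro ⟨i, ⟨hi1, hi2⟩, hle⟩
    rw [PySem.List.pyGetD_eq_getElem cp 0 (by omega) hi2,
        PySem.List.pyGetD_eq_getElem cp 0 (by omega) (by omega : i - 1 < (cp.length : Int))] at hle
    have hm : (i - 1).toNat < (cp.zip cp.tail).length := by
      rw [List.length_zip, List.length_tail]; omega
    refine ⟨(cp.zip cp.tail)[(i - 1).toNat], List.getElem_mem _, ?_⟩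
    rw [List.getElem_zip]
    show cp.tail[(i - 1).toNat]'(by rw [List.length_tail]; omega) ≤ cp[(i - 1).toNat]'(by omega)
    rw [List.getElem_tail]
    have h12 : (i - 1).toNat + 1 = i.toNat := by omega
    simp only [h12]
    exact hle
  · rintro ⟨ab, hab, hle⟩
    rw [List.mem_iff_getElem] at hab
    obtain ⟨m, hm, rfl⟩ := hab
    have hm' : m + 1 < cp.length := by rw [List.length_zip, List.length_tail] at hm; omega
    refine ⟨(m : Int) + 1, ⟨by omega, by exact_mod_cast hm'⟩, ?_⟩
    rw [PySem.List.pyGetD_eq_getElem cp 0 (by omega) (by exact_mod_cast hm'),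
        PySem.List.pyGetD_eq_getElem cp 0 (by omega) (by omega)]
    rw [List.getElem_zip] at hle
    replace hle : cp.tail[m]'(by rw [List.length_tail]; omega) ≤ cp[m]'(by omega) := hle
    rw [List.getElem_tail] at hle
    have h1 : ((m : Int) + 1).toNat = m + 1 := by omega
    have h2 : ((m : Int) + 1 - 1).toNat = m := by omega
    simp only [h1, h2]
    exact hle

lemma pv_post_eq (r : Option (List Int)) :
    (match r with
     | none => none
     | some cuts =>
       let cp := PySem.List.sorted cuts (fun x => x) false
       let ok := (PySem.List.pyRange 1 (cp.length : Int) 1).foldl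
          (fun ok i => if PySem.List.pyGetD cp i 0 ≤ PySem.List.pyGetD cp (i - 1) 0 then false else ok) true
       if ok then some cp else none)
    = (match r with
       | none => none
       | some cuts =>
         let cp := PySem.List.sorted cuts (fun x => x) false
         if (cp.zip cp.tail).any (fun ab => decide (ab.2 ≤ ab.1)) then none else some cp) := by
  cases r with
  | none => rfl
  | some cuts =>
    simp only [pv_check_eq]
    generalize ((PySem.List.sorted cuts (fun x => x) false).zip
        (PySem.List.sorted cuts (fun x => x) false).tail).any (fun ab => decide (ab.2 ≤ ab.1)) = b
    cases b <;> rfl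

-- ===== VERDICT (by name: the statement is the Claim_ definition above) =====
theorem pick_cut_points_py_spec : Claim_equal_pick_cut_points_py := by
  intro ms ts total _
  unfold Spec_pick_cut_points_py
  have h1 : pick_cut_points_py ms ts total
      = (match pvAloop ms total ts PySem.Set.empty [] with
         | none => none
         | some cuts =>
           let cp := PySem.List.sorted cuts (fun x => x) false
           if (cp.zip cp.tail).any (fun ab => decide (ab.2 ≤ ab.1)) then none else some cp) := by
    unfold pick_cut_points_py
    exact pv_post_eq _
  have h2 : pick_cut_points_py_alt ms ts total
      = (match pvBloop total ts (PySem.List.sorted2 (pvFl ms) Prod.fst Prod.snd)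
            (List.map Prod.fst (PySem.List.sorted2 (pvFl ms) Prod.fst Prod.snd)) [] with
         | none => none
         | some cuts =>
           let cp := PySem.List.sorted cuts (fun x => x) false
           if (cp.zip cp.tail).any (fun ab => decide (ab.2 ≤ ab.1)) then none else some cp) := rfl
  rw [h1, h2, pvloop_eq ms total ts PySem.Set.empty _ [] (pv_rem0_pairwise ms) (pv_rem0_mem ms)]
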